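-- pv_equiv track=rewrite | github.com/JonRodCode/MINIGAMES | settings.py | Usuario
-- ===== SOURCE A (Python) =====
-- def Usuario(event_key,username):
--     if len(username) < 3:
--         abecedario = {97: "A",
--                           98: "B",
--                           99: "C",
--                           100: "D",
--                           101: "E",
--                           102: "F",
--                           103: "G",
--                           104: "H",
--                           105: "I",
--                           106: "J",
--                           107: "K",
--                           108: "L",
--                           109: "M",
--                           110: "N",
--                           111: "O",
--                           112: "P",
--                           113: "Q",
--                           114: "R",
--                           115: "S",
--                           116: "T",
--                           117: "U",
--                           118: "V",
--                           119: "W",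
--                           120: "X",
--                           121: "Y",
--                           122: "Z"
--                           }
--         for key in abecedario:
--             if key == event_key:
--                 username += abecedario[key]
--     if event_key == 8:
--         username = username[0:-1]
--     return username
-- ===== SOURCE B (Python) =====
-- def Usuario(event_key, username):
--     if len(username) < 3 and 97 <= event_key <= 122:
--         username += chr(event_key - 32)
--     if event_key == 8:
--         username = username[:-1]
--     return username
-- ===== Notes on version B (the rewrite author's own statement) =====
-- stated objective: simpler
-- what changed: Replaces the 26-entry lowercase-code-to-uppercase-letter dict and the linear scan over its keys with a closed-form range check 97<=event_key<=122 and chr(event_key-32).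
import Mathlib
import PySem

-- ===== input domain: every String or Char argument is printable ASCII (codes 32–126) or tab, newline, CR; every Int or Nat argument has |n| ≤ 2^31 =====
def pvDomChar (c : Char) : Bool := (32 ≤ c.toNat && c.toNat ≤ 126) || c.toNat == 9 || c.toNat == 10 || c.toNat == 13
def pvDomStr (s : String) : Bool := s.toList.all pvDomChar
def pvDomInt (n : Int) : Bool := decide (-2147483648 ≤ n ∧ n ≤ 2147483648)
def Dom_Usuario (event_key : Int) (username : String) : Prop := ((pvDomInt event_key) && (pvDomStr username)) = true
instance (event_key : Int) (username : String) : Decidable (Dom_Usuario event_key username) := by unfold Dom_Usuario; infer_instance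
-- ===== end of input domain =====

-- B replaces A's 26-entry dict and the scan over its keys with a closed-form
-- range check and chr(event_key - 32); objective: simpler.

-- ===== PORT A =====
-- the dict literal `abecedario` (keys 97..122, values "A".."Z" as char lists)
def pvAbecedario : PySem.Dict Int (List Char) :=
  PySem.Dict.ofList
    [(97, ['A']), (98, ['B']), (99, ['C']), (100, ['D']), (101, ['E']),
     (102, ['F']), (103, ['G']), (104, ['H']), (105, ['I']), (106, ['J']),
     (107, ['K']), (108, ['L']), (109, ['M']), (110, ['N']), (111, ['O']),
     (112, ['P']), (113, ['Q']), (114, ['R']), (115, ['S']), (116, ['T']),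
     (117, ['U']), (118, ['V']), (119, ['W']), (120, ['X']), (121, ['Y']),
     (122, ['Z'])]

-- `for key in abecedario: if key == event_key: username += abecedario[key]`
def pvUsuarioCharsA (event_key : Int) (u : List Char) : List Char :=
  let u :=
    if PySem.Chars.len u < 3 then
      pvAbecedario.keys.foldl
        (fun acc key => if key == event_key then acc ++ pvAbecedario.getD key [] else acc) u
    else u
  if event_key == 8 then PySem.Chars.slice u (some 0) (some (-1)) else u

def Usuario (event_key : Int) (username : String) : String :=
  String.ofList (pvUsuarioCharsA event_key username.toList)

-- ===== PORT B =====
def pvUsuarioCharsB (event_key : Int) (u : List Char) : List Char :=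
  let u :=
    if u.length < 3 ∧ 97 ≤ event_key ∧ event_key ≤ 122 then
      u ++ [Char.ofNat (event_key - 32).toNat]
    else u
  if event_key == 8 then u.dropLast else u

def Usuario_alt (event_key : Int) (username : String) : String :=
  String.ofList (pvUsuarioCharsB event_key username.toList)

-- ===== PRECONDITION & SPEC =====
def Spec_Usuario (event_key : Int) (username : String) (out : String) : Prop := out = Usuario_alt event_key username
instance (event_key : Int) (username : String) (out : String) : Decidable (Spec_Usuario event_key username out) := by unfold Spec_Usuario; infer_instance

-- ===== CLAIM (what is proved, stated in full; the proofs are below) =====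
def Claim_equal_Usuario : Prop := ∀ (event_key : Int) (username : String), Dom_Usuario event_key username → Spec_Usuario event_key username (Usuario event_key username)

-- ===== LEMMAS AND PROOFS =====

lemma pv_fold_char (ek : Int) (u : List Char) :
    pvAbecedario.keys.foldl
      (fun acc key => if key == ek then acc ++ pvAbecedario.getD key [] else acc) u
      = if 97 ≤ ek ∧ ek ≤ 122 then u ++ [Char.ofNat (ek - 32).toNat] else u := by
  rw [PySem.List.foldl_congr_mem pvAbecedario.keys _
        (fun acc key => acc ++ (if key == ek then pvAbecedario.getD key [] else [])) u
        (by intro acc x _; by_cases h : (x == ek) = true <;> simp [h])]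
  rw [PySem.List.foldl_append_eq_flatMap]
  rw [show (if 97 ≤ ek ∧ ek ≤ 122 then u ++ [Char.ofNat (ek - 32).toNat] else u)
        = u ++ (if 97 ≤ ek ∧ ek ≤ 122 then [Char.ofNat (ek - 32).toNat] else []) from by
      split <;> simp]
  congr 1
  by_cases h : 97 ≤ ek ∧ ek ≤ 122
  · obtain ⟨h1, h2⟩ := h
    interval_cases ek <;> decide
  · rw [if_neg h, List.flatMap_eq_nil_iff.mpr]
    intro x hx
    have hb : 97 ≤ x ∧ x ≤ 122 := by
      have : ∀ y ∈ pvAbecedario.keys, 97 ≤ y ∧ y ≤ 122 := by decide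
      exact this x hx
    rw [if_neg]
    simp only [beq_iff_eq]
    omega

lemma pv_chars_eq (ek : Int) (u : List Char) :
    pvUsuarioCharsA ek u = pvUsuarioCharsB ek u := by
  unfold pvUsuarioCharsA pvUsuarioCharsB
  simp only [PySem.Chars.len_eq, PySem.Chars.slice_eq_listSlice, PySem.List.slice_zero_start,
             PySem.List.slice_to_neg_one, pv_fold_char]
  split_ifs <;> first | rfl | (exfalso; omega)

-- ===== VERDICT (by name: the statement is the Claim_ definition above) =====
theorem Usuario_spec : Claim_equal_Usuario := by
  intro ek u _
  unfold Spec_Usuario Usuario Usuario_alt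
  rw [pv_chars_eq]
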